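-- pv_equiv track=rewrite | github.com/khanh47/bot | main.py | select_gems_to_use
-- ===== SOURCE A (Python) =====
-- gem_types = {
--     "type1": range(51, 58),    # 051-057
--     "type2": range(65, 72),    # 065-071
--     "type3": range(72, 79),    # 072-078
--     "type4": range(79, 86),    #
-- }
--
-- def select_gems_to_use(available_gems, inactive_types):
--     """Select highest gems from inactive types only"""
--     selected_gems = []
--
--     for gem_type in inactive_types:
--         gem_range = gem_types[gem_type]
--         # Find gems of this type that you actually own
--         type_gems = [g for g in available_gems if g in gem_range]
--         if type_gems:
--             # Get the highest one
--             highest = max(type_gems)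
--             selected_gems.append(highest)
--
--     return sorted(selected_gems)
-- ===== SOURCE B (Python) =====
-- gem_types = {
--     "type1": range(51, 58),    # 051-057
--     "type2": range(65, 72),    # 065-071
--     "type3": range(72, 79),    # 072-078
--     "type4": range(79, 86),    #
-- }
--
-- def select_gems_to_use(available_gems, inactive_types):
--     """Select highest gems from inactive types only"""
--     # One classifying pass: running maximum per gem range.
--     best = {}
--     for g in available_gems:
--         for r in gem_types.values():
--             if g in r:
--                 if r not in best or best[r] < g:
--                     best[r] = g
--                 break
--     selected = []
--     for gem_type in inactive_types:
--         gem_range = gem_types[gem_type]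
--         if gem_range in best:
--             selected.append(best[gem_range])
--     return sorted(selected)
-- ===== Notes on version B (the rewrite author's own statement) =====
-- stated objective: faster
-- what changed: Instead of rescanning available_gems once per inactive type, B makes a single classifying pass over available_gems keeping the running maximum per gem range in a dict keyed by the range, then a lookup pass over inactive_types.
import Mathlib
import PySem

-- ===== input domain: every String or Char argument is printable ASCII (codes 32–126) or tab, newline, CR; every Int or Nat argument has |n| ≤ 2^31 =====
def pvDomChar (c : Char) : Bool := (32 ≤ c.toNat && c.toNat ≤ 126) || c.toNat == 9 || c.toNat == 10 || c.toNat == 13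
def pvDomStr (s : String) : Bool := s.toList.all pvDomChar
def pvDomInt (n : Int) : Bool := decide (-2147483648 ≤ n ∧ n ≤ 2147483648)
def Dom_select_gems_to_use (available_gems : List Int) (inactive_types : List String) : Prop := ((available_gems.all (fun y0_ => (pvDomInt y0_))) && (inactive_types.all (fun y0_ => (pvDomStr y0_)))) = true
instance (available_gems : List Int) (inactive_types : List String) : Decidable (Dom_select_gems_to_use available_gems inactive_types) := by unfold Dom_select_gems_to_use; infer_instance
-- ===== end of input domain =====

-- B replaces A's per-inactive-type rescan of available_gems by one classifying pass
-- recording the running maximum per gem type in a dict, then a lookup pass (faster decomposition).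

-- ===== PORT A =====
-- module-level gem_types dict; range(a, b) is ported as the pair (a, b), membership = a ≤ g < b
def gemTypesItems : List (String × Int × Int) :=
  [("type1", 51, 58), ("type2", 65, 72), ("type3", 72, 79), ("type4", 79, 86)]

def select_gems_to_use (available_gems : List Int) (inactive_types : List String) : List Int :=
  let selected := inactive_types.foldl (fun acc gem_type =>
    match (PySem.Dict.mk gemTypesItems).get? gem_type with
    | none => acc   -- KeyError in Python; excluded by Pre_
    | some (lo, hi) =>
      let type_gems := available_gems.filter (fun g => decide (lo ≤ g ∧ g < hi))
      match PySem.List.max? type_gems (fun x => x) with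
      | none => acc
      | some highest => acc ++ [highest]) []
  PySem.List.sorted selected (fun x => x) false

-- ===== PORT B =====
-- gem_types.values(): the four ranges, as (lo, hi) pairs
def gemTypesValues : List (Int × Int) := [(51, 58), (65, 72), (72, 79), (79, 86)]

-- the classifying pass: running maximum per gem range
def bestOf (available_gems : List Int) : PySem.Dict (Int × Int) Int :=
  available_gems.foldl (fun best g =>
    match gemTypesValues.find? (fun r => decide (r.1 ≤ g ∧ g < r.2)) with
    | none => best
    | some r =>
      match best.get? r with
      | none => best.insert r g
      | some m => if m < g then best.insert r g else best) PySem.Dict.empty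

def select_gems_to_use_alt (available_gems : List Int) (inactive_types : List String) : List Int :=
  let best := bestOf available_gems
  let selected := inactive_types.foldl (fun acc gem_type =>
    match (PySem.Dict.mk gemTypesItems).get? gem_type with
    | none => acc   -- KeyError in Python, as in A; excluded by Pre_
    | some gem_range =>
      match best.get? gem_range with
      | some m => acc ++ [m]
      | none => acc) []
  PySem.List.sorted selected (fun x => x) false

-- ===== PRECONDITION & SPEC =====
-- Pre_ excludes inactive_types containing a string that is not a key of gem_types: A raises KeyError there.
def Pre_select_gems_to_use (available_gems : List Int) (inactive_types : List String) : Prop :=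
  ∀ t ∈ inactive_types, t = "type1" ∨ t = "type2" ∨ t = "type3" ∨ t = "type4"

instance (available_gems : List Int) (inactive_types : List String) : Decidable (Pre_select_gems_to_use available_gems inactive_types) := by unfold Pre_select_gems_to_use; infer_instance

def pvWitness_select_gems_to_use : List Int × List String := ([52, 70, 80, 55], ["type1", "type4", "type1"])

def Spec_select_gems_to_use (available_gems : List Int) (inactive_types : List String) (out : List Int) : Prop := out = select_gems_to_use_alt available_gems inactive_types
instance (available_gems : List Int) (inactive_types : List String) (out : List Int) : Decidable (Spec_select_gems_to_use available_gems inactive_types out) := by unfold Spec_select_gems_to_use; infer_instance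

-- ===== CLAIM (what is proved, stated in full; the proofs are below) =====
def Claim_equal_select_gems_to_use : Prop := ∀ (available_gems : List Int) (inactive_types : List String), Dom_select_gems_to_use available_gems inactive_types → Pre_select_gems_to_use available_gems inactive_types → Spec_select_gems_to_use available_gems inactive_types (select_gems_to_use available_gems inactive_types)


-- ===== LEMMAS AND PROOFS =====

-- Python's max over a list with one element appended on the right
theorem max?_id_append_one (xs : List Int) (g : Int) :
    PySem.List.max? (xs ++ [g]) (fun x => x) =
      some ((PySem.List.max? xs (fun x => x)).elim g (fun m => max m g)) := by
  cases xs with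
  | nil => simp [PySem.List.max?]
  | cons x t =>
    rw [List.cons_append, PySem.List.max?_id_cons, PySem.List.max?_id_cons]
    simp [List.foldl_append]

-- evaluation of B's classifying search over the four (disjoint) ranges
theorem find?_gem_eval (g : Int) :
    gemTypesValues.find? (fun r => decide (r.1 ≤ g ∧ g < r.2)) =
      if 51 ≤ g ∧ g < 58 then some (51, 58)
      else if 65 ≤ g ∧ g < 72 then some (65, 72)
      else if 72 ≤ g ∧ g < 79 then some (72, 79)
      else if 79 ≤ g ∧ g < 86 then some (79, 86)
      else none := by
  by_cases c1 : (51:Int) ≤ g ∧ g < 58 <;> by_cases c2 : (65:Int) ≤ g ∧ g < 72 <;>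
    by_cases c3 : (72:Int) ≤ g ∧ g < 79 <;> by_cases c4 : (79:Int) ≤ g ∧ g < 86 <;>
    simp only [gemTypesValues, List.find?] <;>
    simp [c1, c2, c3, c4]

-- invariant of the classifying pass, for one range
theorem bestOf_get (lo hi : Int)
    (H1 : ∀ g : Int, lo ≤ g → g < hi →
      gemTypesValues.find? (fun r => decide (r.1 ≤ g ∧ g < r.2)) = some (lo, hi))
    (H2 : ∀ (g : Int) r, gemTypesValues.find? (fun r => decide (r.1 ≤ g ∧ g < r.2)) = some r →
      r = (lo, hi) → lo ≤ g ∧ g < hi)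
    (av : List Int) :
    (bestOf av).get? (lo, hi) =
      PySem.List.max? (av.filter (fun g => decide (lo ≤ g ∧ g < hi))) (fun x => x) := by
  induction av using List.reverseRecOn with
  | nil => simp [bestOf, PySem.List.max?, PySem.Dict.get?_empty]
  | append_singleton xs g ih =>
    have hstep : bestOf (xs ++ [g]) =
        (match gemTypesValues.find? (fun r => decide (r.1 ≤ g ∧ g < r.2)) with
        | none => bestOf xs
        | some r =>
          match (bestOf xs).get? r with
          | none => (bestOf xs).insert r g
          | some m => if m < g then (bestOf xs).insert r g else bestOf xs) := by
      simp [bestOf, List.foldl_append]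
    rw [hstep, List.filter_append]
    by_cases hin : lo ≤ g ∧ g < hi
    · rw [H1 g hin.1 hin.2]
      have hfil : List.filter (fun g => decide (lo ≤ g ∧ g < hi)) [g] = [g] := by
        simp [hin.1, hin.2]
      rw [hfil, max?_id_append_one]
      cases hm : PySem.List.max? (List.filter (fun g => decide (lo ≤ g ∧ g < hi)) xs) (fun x => x) with
      | none =>
        have hbt : (bestOf xs).get? (lo, hi) = none := ih.trans hm
        simp only [hbt, PySem.Dict.get?_insert_self, Option.elim]
      | some m =>
        have hbt : (bestOf xs).get? (lo, hi) = some m := ih.trans hm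
        simp only [hbt, Option.elim]
        by_cases hlt : m < g
        · rw [if_pos hlt, PySem.Dict.get?_insert_self, max_eq_right hlt.le]
        · rw [if_neg hlt, hbt, max_eq_left (le_of_not_gt hlt)]
    · have hfil : List.filter (fun g => decide (lo ≤ g ∧ g < hi)) [g] = [] := by
        simp; omega
      rw [hfil, List.append_nil]
      cases hf : gemTypesValues.find? (fun r => decide (r.1 ≤ g ∧ g < r.2)) with
      | none => exact ih
      | some r =>
        have hne : (lo, hi) ≠ r := fun he => hin (H2 g r hf he.symm)
        cases hb : (bestOf xs).get? r with
        | none => simp only [hb]; rw [PySem.Dict.get?_insert_of_ne _ _ hne, ih]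
        | some m =>
          simp only [hb]
          by_cases hlt : m < g
          · rw [if_pos hlt, PySem.Dict.get?_insert_of_ne _ _ hne, ih]
          · rw [if_neg hlt, ih]

-- for a valid key t, what A looks up and what B's classifying dict holds for its range
theorem key_get_eq (av : List Int) (t : String)
    (ht : t = "type1" ∨ t = "type2" ∨ t = "type3" ∨ t = "type4") :
    ∃ lo hi, (PySem.Dict.mk gemTypesItems).get? t = some (lo, hi) ∧
      (bestOf av).get? (lo, hi) =
        PySem.List.max? (av.filter (fun g => decide (lo ≤ g ∧ g < hi))) (fun x => x) := by
  rcases ht with rfl | rfl | rfl | rfl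
  · refine ⟨51, 58, by decide, bestOf_get _ _ ?_ ?_ av⟩
    · intro g a b; rw [find?_gem_eval, if_pos ⟨a, b⟩]
    · intro g r hf he
      rw [find?_gem_eval] at hf
      split_ifs at hf with h1 h2 h3 h4 <;>
        rw [Option.some.injEq] at hf <;> rw [← hf] at he <;>
        first
          | exact h1
          | (exact absurd he (by decide))
  · refine ⟨65, 72, by decide, bestOf_get _ _ ?_ ?_ av⟩
    · intro g a b; rw [find?_gem_eval, if_neg (by omega), if_pos ⟨a, b⟩]
    · intro g r hf he
      rw [find?_gem_eval] at hf
      split_ifs at hf with h1 h2 h3 h4 <;>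
        rw [Option.some.injEq] at hf <;> rw [← hf] at he <;>
        first
          | exact h2
          | (exact absurd he (by decide))
  · refine ⟨72, 79, by decide, bestOf_get _ _ ?_ ?_ av⟩
    · intro g a b; rw [find?_gem_eval, if_neg (by omega), if_neg (by omega), if_pos ⟨a, b⟩]
    · intro g r hf he
      rw [find?_gem_eval] at hf
      split_ifs at hf with h1 h2 h3 h4 <;>
        rw [Option.some.injEq] at hf <;> rw [← hf] at he <;>
        first
          | exact h3
          | (exact absurd he (by decide))
  · refine ⟨79, 86, by decide, bestOf_get _ _ ?_ ?_ av⟩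
    · intro g a b
      rw [find?_gem_eval, if_neg (by omega), if_neg (by omega), if_neg (by omega), if_pos ⟨a, b⟩]
    · intro g r hf he
      rw [find?_gem_eval] at hf
      split_ifs at hf with h1 h2 h3 h4 <;>
        rw [Option.some.injEq] at hf <;> rw [← hf] at he <;>
        first
          | exact h4
          | (exact absurd he (by decide))

-- the two accumulation loops over inactive_types agree
theorem fold_eq (av : List Int) (it : List String)
    (hpre : ∀ t ∈ it, t = "type1" ∨ t = "type2" ∨ t = "type3" ∨ t = "type4") :
    ∀ acc : List Int,
      it.foldl (fun acc gem_type =>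
        match (PySem.Dict.mk gemTypesItems).get? gem_type with
        | none => acc
        | some (lo, hi) =>
          match PySem.List.max? (av.filter (fun g => decide (lo ≤ g ∧ g < hi))) (fun x => x) with
          | none => acc
          | some highest => acc ++ [highest]) acc
      = it.foldl (fun acc gem_type =>
          match (PySem.Dict.mk gemTypesItems).get? gem_type with
          | none => acc
          | some gem_range =>
            match (bestOf av).get? gem_range with
            | some m => acc ++ [m]
            | none => acc) acc := by
  induction it with
  | nil => intro acc; rfl
  | cons t rest ih =>
    intro acc
    obtain ⟨lo, hi, h1, h2⟩ := key_get_eq av t (hpre t (List.mem_cons_self ..))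
    cases hmx : PySem.List.max? (av.filter (fun g => decide (lo ≤ g ∧ g < hi))) (fun x => x) with
    | none =>
      simp only [List.foldl_cons, h1, h2, hmx]
      exact ih (fun t ht => hpre t (List.mem_cons_of_mem _ ht)) acc
    | some m =>
      simp only [List.foldl_cons, h1, h2, hmx]
      exact ih (fun t ht => hpre t (List.mem_cons_of_mem _ ht)) (acc ++ [m])

-- ===== VERDICT (by name: the statement is the Claim_ definition above) =====
theorem select_gems_to_use_spec : Claim_equal_select_gems_to_use := by
  intro av it _ hpre
  unfold Spec_select_gems_to_use select_gems_to_use select_gems_to_use_alt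
  rw [fold_eq av it hpre []]
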